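-- pv_equiv track=rewrite | github.com/mmdaz/my_solved_algorithm_problems | old-codes/build_tower.py | floor_builder
-- ===== SOURCE A (Python) =====
-- def floor_builder (num , max_num):
--     floor = ""
--     for i in range(1 , max_num + 1):
--         if i in range (int((max_num + 1)/2) - int((num - 1 ) / 2) , int((max_num + 1)/2 + (num - 1 ) / 2 + 1 )):
--             floor += "*"
--         else:
--             floor += " "
--     return floor
-- ===== SOURCE B (Python) =====
-- def floor_builder(num, max_num):
--     lo = int((max_num + 1) / 2) - int((num - 1) / 2)
--     hi = int((max_num + 1) / 2 + (num - 1) / 2 + 1)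
--     star_start = max(1, lo)
--     star_end = min(max_num, hi - 1)
--     stars = max(0, star_end - star_start + 1)
--     left = star_start - 1 if stars > 0 else 0
--     return " " * left + "*" * stars + " " * (max_num - left - stars)
-- ===== Notes on version B (the rewrite author's own statement) =====
-- stated objective: simpler
-- what changed: Replaces A's per-position loop (testing each index 1..max_num against the star interval and appending char by char) by a closed-form computation of the three segment lengths (left spaces, stars, right spaces) and one string-repetition concatenation.
import Mathlib
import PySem

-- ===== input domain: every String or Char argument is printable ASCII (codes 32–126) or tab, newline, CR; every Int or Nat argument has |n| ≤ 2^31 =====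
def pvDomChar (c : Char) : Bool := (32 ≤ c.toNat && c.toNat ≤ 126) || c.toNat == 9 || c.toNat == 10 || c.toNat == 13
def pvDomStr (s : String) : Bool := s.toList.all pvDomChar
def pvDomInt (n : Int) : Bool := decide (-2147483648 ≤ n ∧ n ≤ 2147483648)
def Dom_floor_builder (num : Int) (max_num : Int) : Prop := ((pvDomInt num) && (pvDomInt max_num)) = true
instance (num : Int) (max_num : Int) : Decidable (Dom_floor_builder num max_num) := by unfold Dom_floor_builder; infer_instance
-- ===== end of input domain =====

-- B is simpler: it computes the three segment lengths (left spaces, stars, right spaces) in closed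
-- form and concatenates, instead of scanning every position against the star interval.
-- Python's float arithmetic here (sums of halves with magnitude ≤ 2^31+2) is exact and int()
-- truncates toward zero, so int((max_num+1)/2) = (max_num+1).tdiv 2 and
-- int((max_num+1)/2 + (num-1)/2 + 1) = (max_num+num+2).tdiv 2 (exact rational rewriting).

-- ===== PORT A =====
def floor_builder (num : Int) (max_num : Int) : String :=
  -- floor = ""; for i in range(1, max_num+1): floor += "*" if i in range(lo, hi) else " "
  String.ofList ((PySem.List.pyRange 1 (max_num + 1) 1).foldl
    (fun acc i =>
      if (max_num + 1).tdiv 2 - (num - 1).tdiv 2 ≤ i ∧ i < (max_num + num + 2).tdiv 2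
      then acc ++ ['*'] else acc ++ [' '])
    [])

-- ===== PORT B =====
def floor_builder_alt (num : Int) (max_num : Int) : String :=
  let lo := (max_num + 1).tdiv 2 - (num - 1).tdiv 2
  let hi := (max_num + num + 2).tdiv 2
  let star_start := max 1 lo
  let star_end := min max_num (hi - 1)
  let stars := max 0 (star_end - star_start + 1)
  let left := if stars > 0 then star_start - 1 else 0
  String.ofList (List.replicate left.toNat ' ' ++ List.replicate stars.toNat '*' ++
                 List.replicate (max_num - left - stars).toNat ' ')

-- ===== PRECONDITION & SPEC =====
def Spec_floor_builder (num : Int) (max_num : Int) (out : String) : Prop := out = floor_builder_alt num max_num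
instance (num : Int) (max_num : Int) (out : String) : Decidable (Spec_floor_builder num max_num out) := by unfold Spec_floor_builder; infer_instance

-- ===== CLAIM (what is proved, stated in full; the proofs are below) =====
def Claim_equal_floor_builder : Prop := ∀ (num : Int) (max_num : Int), Dom_floor_builder num max_num → Spec_floor_builder num max_num (floor_builder num max_num)

-- ===== LEMMAS AND PROOFS =====

-- indexing a three-block concatenation of replicates
theorem getElem_three_replicate (L S R : Nat) (a b c : Char) (j : Nat)
    (h : j < (List.replicate L a ++ List.replicate S b ++ List.replicate R c).length) :
    (List.replicate L a ++ List.replicate S b ++ List.replicate R c)[j]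
      = if j < L then a else if j < L + S then b else c := by
  have hlen : j < L + S + R := by simp at h; omega
  by_cases h1 : j < L
  · rw [List.getElem_append_left (by simp [List.length_append, List.length_replicate]; omega),
        List.getElem_append_left (by simpa using h1), List.getElem_replicate]
    simp [h1]
  · by_cases h2 : j < L + S
    · rw [List.getElem_append_left (by simp [List.length_append, List.length_replicate]; omega),
          List.getElem_append_right (by simpa using h1), List.getElem_replicate]
      simp [h1, h2]
    · rw [List.getElem_append_right (by simp [List.length_append, List.length_replicate]; omega),
          List.getElem_replicate]
      simp [h1, h2]

-- mapping an interval test over range(1, n+1) gives three replicate blocks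
theorem range_map_ite_eq_segments (n : Nat) (lo hi : Int) (L S R : Nat)
    (hsum : L + S + R = n)
    (hstar : ∀ k : Nat, k < n → ((lo ≤ 1 + (k : Int) ∧ 1 + (k : Int) < hi) ↔ (L ≤ k ∧ k < L + S))) :
    (List.range n).map (fun (k : Nat) => if lo ≤ 1 + (k : Int) ∧ 1 + (k : Int) < hi then '*' else ' ')
      = List.replicate L ' ' ++ List.replicate S '*' ++ List.replicate R ' ' := by
  apply List.ext_getElem
  · simp only [List.length_map, List.length_range, List.length_append, List.length_replicate]
    omega
  · intro j h1 h2
    have hj : j < n := by simpa using h1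
    rw [List.getElem_map, List.getElem_range, getElem_three_replicate]
    have hiff := hstar j hj
    by_cases hL : j < L
    · rw [if_pos hL, if_neg (fun hc => by have := hiff.mp hc; omega)]
    · by_cases hS : j < L + S
      · rw [if_neg hL, if_pos hS, if_pos (hiff.mpr ⟨by omega, hS⟩)]
      · rw [if_neg hL, if_neg hS, if_neg (fun hc => by have := hiff.mp hc; omega)]

theorem floor_builder_spec : Claim_equal_floor_builder := by
  intro num max_num _
  unfold Spec_floor_builder
  simp only [floor_builder, floor_builder_alt]
  set lo := (max_num + 1).tdiv 2 - (num - 1).tdiv 2 with hlo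
  set hi := (max_num + num + 2).tdiv 2 with hhi
  set ss := max 1 lo with hss
  set se := min max_num (hi - 1) with hse
  set stars := max 0 (se - ss + 1) with hstars
  set left : Int := if stars > 0 then ss - 1 else 0 with hleft
  have hst0 : 0 ≤ stars := le_max_left _ _
  rw [show (fun (acc : List Char) (i : Int) => if lo ≤ i ∧ i < hi then acc ++ ['*'] else acc ++ [' '])
        = fun acc i => acc ++ [if lo ≤ i ∧ i < hi then '*' else ' '] from by
      funext acc i; split <;> rfl,
    PySem.List.foldl_append_singleton_eq_map, List.nil_append, PySem.List.pyRange_one,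
    List.map_map]
  congr 1
  have hcomp : ((fun i : Int => if lo ≤ i ∧ i < hi then '*' else ' ') ∘ fun k : Nat => 1 + (k : Int))
      = fun (k : Nat) => if lo ≤ 1 + (k : Int) ∧ 1 + (k : Int) < hi then '*' else ' ' := rfl
  rw [hcomp]
  by_cases hm : 0 ≤ max_num
  · apply range_map_ite_eq_segments ((max_num + 1 - 1).toNat) lo hi
      left.toNat stars.toNat (max_num - left - stars).toNat
    · by_cases hpos : stars > 0
      · simp only [hleft, if_pos hpos]; omega
      · have hz : stars = 0 := by omega
        simp only [hleft, if_neg hpos, hz]; omega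
    · intro k hk
      by_cases hpos : stars > 0
      · simp only [hleft, if_pos hpos]; omega
      · have hz : stars = 0 := by omega
        simp only [hleft, if_neg hpos, hz]
        constructor
        · rintro ⟨hA, hB⟩; exfalso; omega
        · intro hAB; omega
  · have h0 : (max_num + 1 - 1).toNat = 0 := by omega
    have hz : stars = 0 := by omega
    have hl : left = 0 := by simp [hleft, hz]
    have hr : (max_num - left - stars).toNat = 0 := by omega
    rw [h0, hr, hz, hl]
    simp
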